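-- pv_equiv track=rewrite | github.com/harishvavilala/Betterhappo | calendar generator tests/fullCalenderTest.py | allSundays
-- ===== SOURCE A (Python) =====
-- def numDayToMDY(dayNum,year):# -> month, Day, Year
--     leap = not((year % 100) %4 == 0 or ((year % 1000) - (year % 100)) % 4 == 0)
--     monthDays =  (31,28+leap,31,30,31,30,31,31,30,31,30,31)
--     for month in range(12):
--         if dayNum > monthDays[month]:
--             dayNum-=monthDays[month]
--         else:
--             return month+1,dayNum,year
--
-- def weekDay(month = 0 ,day = 0,year = 0, date = ()): # - >int
--     if len(date)>0:
--         month= date[0]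
--         day = date[1]
--         year = date[2]
--     if month<3:
--         month+=10
--         d = (year%100)-1
--     else:
--          month-=2
--          d = (year%100)
--     c = (year-d)//100
--     f = (day + ((13*month)-1)//5 + d + (d//4) + (c//4) - (2*c))%7
--     return f
--
-- def allSundays(year): # - >[ [int,int,int,string,string] ]
--     leap = not((year % 100) %4 == 0 or ((year % 1000) - (year % 100)) % 4 == 0)
--     calender = []
--     for i in range(1-weekDay(1,1,year),366+leap,7):
--         if i>0:
--             month,day, year = numDayToMDY(i,year)
--             dayOfTheWeek = weekDay(date=(month,day,year))
--             calender.append((month,day,year))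
--     return calender
-- ===== SOURCE B (Python) =====
-- def allSundays(year):
--     # One forward sweep over the calendar, maintaining the weekday mod 7,
--     # instead of stepping through day numbers and converting each back to m/d.
--     leap = 0 if ((year % 100) % 4 == 0 or ((year % 1000) - (year % 100)) % 4 == 0) else 1
--     d = (year % 100) - 1
--     c = (year - d) // 100
--     w = (29 + d + d // 4 + c // 4 - 2 * c) % 7  # weekday code of Jan 1 (0 = Sunday)
--     out = []
--     for m, ndays in enumerate((31, 28 + leap, 31, 30, 31, 30, 31, 31, 30, 31, 30, 31), 1):
--         for day in range(1, ndays + 1):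
--             if w == 0:
--                 out.append((m, day, year))
--             w = (w + 1) % 7
--     return out
-- ===== Notes on version B (the rewrite author's own statement) =====
-- stated objective: simpler
-- what changed: Instead of stepping through Sunday day-numbers a week at a time and converting each back to month/day via numDayToMDY's month scan, B makes one month-by-month sweep over the year maintaining the weekday counter modulo a week and appends (month, day, year) whenever it hits Sunday.
import Mathlib
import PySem

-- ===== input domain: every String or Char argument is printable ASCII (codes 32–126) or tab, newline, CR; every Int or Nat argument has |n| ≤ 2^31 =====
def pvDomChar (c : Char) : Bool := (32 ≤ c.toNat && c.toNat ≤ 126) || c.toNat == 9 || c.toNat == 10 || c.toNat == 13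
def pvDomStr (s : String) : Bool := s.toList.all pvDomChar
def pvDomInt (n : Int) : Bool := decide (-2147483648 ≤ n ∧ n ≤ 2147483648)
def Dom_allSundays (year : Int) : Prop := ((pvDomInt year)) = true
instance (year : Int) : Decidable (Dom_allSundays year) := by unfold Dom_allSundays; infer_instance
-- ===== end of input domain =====

-- B replaces A's stride-7 walk over day numbers (each converted back to month/day)
-- by a single month-by-month sweep that maintains the weekday counter; objective: simpler.

-- ===== PORT A =====
-- leap as in A: `not((year % 100) % 4 == 0 or ((year % 1000) - (year % 100)) % 4 == 0)`,
-- as the Int 0/1 it is used as (the identical expression appears in numDayToMDY and allSundays)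
def pvLeapA (year : Int) : Int :=
  if PySem.Int.mod (PySem.Int.mod year 100) 4 = 0 ∨
     PySem.Int.mod (PySem.Int.mod year 1000 - PySem.Int.mod year 100) 4 = 0 then 0 else 1

-- the `for month in range(12)` loop of numDayToMDY; none = Python's implicit None fall-through
def mdyLoop : List Int → Int → Int → Int → Option (Int × Int × Int)
  | [], _, _, _ => none
  | md :: rest, month, dayNum, year =>
    if dayNum > md then mdyLoop rest (month + 1) (dayNum - md) year
    else some (month + 1, dayNum, year)

def numDayToMDY (dayNum year : Int) : Option (Int × Int × Int) :=
  let leap := pvLeapA year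
  mdyLoop [31, 28 + leap, 31, 30, 31, 30, 31, 31, 30, 31, 30, 31] 0 dayNum year

-- the date tuple is a List Int; `.getD 0` on the tuple indexing is unreachable for A's calls ([] or 3 elements)
def weekDay (month day year : Int) (date : List Int) : Int :=
  let mdy :=
    if 0 < date.length then
      ((PySem.List.pyGet? date 0).getD 0, (PySem.List.pyGet? date 1).getD 0,
       (PySem.List.pyGet? date 2).getD 0)
    else (month, day, year)
  let month := mdy.1
  let day := mdy.2.1
  let year := mdy.2.2
  let md := if month < 3 then (month + 10, PySem.Int.mod year 100 - 1)
            else (month - 2, PySem.Int.mod year 100)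
  let c := PySem.Int.floordiv (year - md.2) 100
  PySem.Int.mod (day + PySem.Int.floordiv (13 * md.1 - 1) 5 + md.2 +
    PySem.Int.floordiv md.2 4 + PySem.Int.floordiv c 4 - 2 * c) 7

def allSundays (year : Int) : List (Int × Int × Int) :=
  let leap := pvLeapA year
  (PySem.List.pyRange (1 - weekDay 1 1 year []) (366 + leap) 7).foldl
    (fun cal i =>
      if i > 0 then
        match numDayToMDY i year with
        | some (month, day, y) =>
          let _dayOfTheWeek := weekDay 0 0 0 [month, day, y]  -- computed and unused, as in A
          cal ++ [(month, day, y)]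
        | none => cal  -- unreachable: dayNum is always within the year's length
      else cal) []

-- ===== PORT B =====
def pvLeapB (year : Int) : Int :=
  if PySem.Int.mod (PySem.Int.mod year 100) 4 = 0 ∨
     PySem.Int.mod (PySem.Int.mod year 1000 - PySem.Int.mod year 100) 4 = 0 then 0 else 1

def allSundays_alt (year : Int) : List (Int × Int × Int) :=
  let leap := pvLeapB year
  let d := PySem.Int.mod year 100 - 1
  let c := PySem.Int.floordiv (year - d) 100
  let w0 := PySem.Int.mod (29 + d + PySem.Int.floordiv d 4 + PySem.Int.floordiv c 4 - 2 * c) 7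
  ((PySem.List.enumerate [31, 28 + leap, 31, 30, 31, 30, 31, 31, 30, 31, 30, 31] 1).foldl
    (fun (st : Int × List (Int × Int × Int)) me =>
      (PySem.List.pyRange 1 (me.2 + 1) 1).foldl
        (fun (st : Int × List (Int × Int × Int)) day =>
          (PySem.Int.mod (st.1 + 1) 7,
           if st.1 = 0 then st.2 ++ [(me.1, day, year)] else st.2)) st)
    (w0, [])).2

-- ===== PRECONDITION & SPEC =====
def Spec_allSundays (year : Int) (out : List (Int × Int × Int)) : Prop := out = allSundays_alt year
instance (year : Int) (out : List (Int × Int × Int)) : Decidable (Spec_allSundays year out) := by unfold Spec_allSundays; infer_instance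

-- ===== CLAIM (what is proved, stated in full; the proofs are below) =====
def Claim_equal_allSundays : Prop := ∀ (year : Int), Dom_allSundays year → Spec_allSundays year (allSundays year)

-- ===== LEMMAS AND PROOFS =====

-- year-free version of mdyLoop
def mdy2 : List Int → Int → Int → Option (Int × Int)
  | [], _, _ => none
  | md :: rest, month, dayNum =>
    if dayNum > md then mdy2 rest (month + 1) (dayNum - md)
    else some (month + 1, dayNum)

lemma mdyLoop_eq_mdy2 : ∀ (mds : List Int) (month dayNum year : Int),
    mdyLoop mds month dayNum year = (mdy2 mds month dayNum).map (fun p => (p.1, p.2, year)) := by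
  intro mds
  induction mds with
  | nil => intro month dayNum year; rfl
  | cons md rest ih =>
    intro month dayNum year
    simp only [mdyLoop, mdy2]
    split <;> simp [ih]

-- year-free shapes of the two loops
def pairsA (f0 leap : Int) : List (Int × Int) :=
  (PySem.List.pyRange (1 - f0) (366 + leap) 7).foldl
    (fun cal i =>
      if i > 0 then
        match mdy2 [31, 28 + leap, 31, 30, 31, 30, 31, 31, 30, 31, 30, 31] 0 i with
        | some p => cal ++ [p]
        | none => cal
      else cal) []

def pairsB (w0 leap : Int) : List (Int × Int) :=
  ((PySem.List.enumerate [31, 28 + leap, 31, 30, 31, 30, 31, 31, 30, 31, 30, 31] 1).foldl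
    (fun (st : Int × List (Int × Int)) me =>
      (PySem.List.pyRange 1 (me.2 + 1) 1).foldl
        (fun st day =>
          (PySem.Int.mod (st.1 + 1) 7,
           if st.1 = 0 then st.2 ++ [(me.1, day)] else st.2)) st)
    (w0, [])).2

lemma foldA_map (leap year : Int) (l : List Int) : ∀ (acc : List (Int × Int)),
    l.foldl (fun cal i =>
        if i > 0 then
          match mdyLoop [31, 28 + leap, 31, 30, 31, 30, 31, 31, 30, 31, 30, 31] 0 i year with
          | some (month, day, y) => cal ++ [(month, day, y)]
          | none => cal
        else cal) (acc.map (fun p => (p.1, p.2, year)))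
    = (l.foldl (fun cal i =>
        if i > 0 then
          match mdy2 [31, 28 + leap, 31, 30, 31, 30, 31, 31, 30, 31, 30, 31] 0 i with
          | some p => cal ++ [p]
          | none => cal
        else cal) acc).map (fun p => (p.1, p.2, year)) := by
  induction l with
  | nil => intro acc; rfl
  | cons i rest ih =>
    intro acc
    simp only [List.foldl_cons]
    rw [mdyLoop_eq_mdy2]
    by_cases hi : i > 0
    · simp only [hi, if_pos]
      cases h : mdy2 [31, 28 + leap, 31, 30, 31, 30, 31, 31, 30, 31, 30, 31] 0 i with
      | none => simp [ih]
      | some p => simpa using ih (acc ++ [p])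
    · simp [hi, ih]

lemma allSundays_eq_pairsA (year : Int) :
    allSundays year
      = (pairsA (weekDay 1 1 year []) (pvLeapA year)).map (fun p => (p.1, p.2, year)) := by
  simp only [allSundays, pairsA]
  simpa only [List.map_nil] using
    foldA_map (pvLeapA year) year
      (PySem.List.pyRange (1 - weekDay 1 1 year []) (366 + pvLeapA year) 7) []

def stepBP (m : Int) (st : Int × List (Int × Int)) (day : Int) : Int × List (Int × Int) :=
  (PySem.Int.mod (st.1 + 1) 7, if st.1 = 0 then st.2 ++ [(m, day)] else st.2)

lemma foldB_inner (year m : Int) (l : List Int) : ∀ (st : Int × List (Int × Int)),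
    l.foldl (fun (st : Int × List (Int × Int × Int)) day =>
        (PySem.Int.mod (st.1 + 1) 7,
         if st.1 = 0 then st.2 ++ [(m, day, year)] else st.2))
      (st.1, st.2.map (fun p => (p.1, p.2, year)))
    = ((l.foldl (stepBP m) st).1, (l.foldl (stepBP m) st).2.map (fun p => (p.1, p.2, year))) := by
  induction l with
  | nil => intro st; rfl
  | cons day rest ih =>
    intro st
    simp only [List.foldl_cons, stepBP]
    by_cases h0 : st.1 = 0
    · simpa [h0, stepBP] using ih (PySem.Int.mod (st.1 + 1) 7, st.2 ++ [(m, day)])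
    · simpa [h0, stepBP] using ih (PySem.Int.mod (st.1 + 1) 7, st.2)

lemma foldB_outer (year : Int) (ms : List (Int × Int)) : ∀ (st : Int × List (Int × Int)),
    ms.foldl (fun (st : Int × List (Int × Int × Int)) me =>
        (PySem.List.pyRange 1 (me.2 + 1) 1).foldl
          (fun st day =>
            (PySem.Int.mod (st.1 + 1) 7,
             if st.1 = 0 then st.2 ++ [(me.1, day, year)] else st.2)) st)
      (st.1, st.2.map (fun p => (p.1, p.2, year)))
    = ((ms.foldl (fun st me => (PySem.List.pyRange 1 (me.2 + 1) 1).foldl (stepBP me.1) st) st).1,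
       (ms.foldl (fun st me => (PySem.List.pyRange 1 (me.2 + 1) 1).foldl (stepBP me.1) st) st).2.map
         (fun p => (p.1, p.2, year))) := by
  induction ms with
  | nil => intro st; rfl
  | cons me rest ih =>
    intro st
    simp only [List.foldl_cons]
    rw [foldB_inner]
    exact ih _

lemma allSundays_alt_eq_pairsB (year : Int) :
    allSundays_alt year
      = (pairsB (PySem.Int.mod (29 + (PySem.Int.mod year 100 - 1)
            + PySem.Int.floordiv (PySem.Int.mod year 100 - 1) 4
            + PySem.Int.floordiv (PySem.Int.floordiv (year - (PySem.Int.mod year 100 - 1)) 100) 4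
            - 2 * PySem.Int.floordiv (year - (PySem.Int.mod year 100 - 1)) 100) 7)
          (pvLeapB year)).map (fun p => (p.1, p.2, year)) := by
  simp only [allSundays_alt, pairsB]
  have h := foldB_outer year
    (PySem.List.enumerate [31, 28 + pvLeapB year, 31, 30, 31, 30, 31, 31, 30, 31, 30, 31] 1)
    (PySem.Int.mod (29 + (PySem.Int.mod year 100 - 1)
        + PySem.Int.floordiv (PySem.Int.mod year 100 - 1) 4
        + PySem.Int.floordiv (PySem.Int.floordiv (year - (PySem.Int.mod year 100 - 1)) 100) 4
        - 2 * PySem.Int.floordiv (year - (PySem.Int.mod year 100 - 1)) 100) 7, [])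
  simp only [List.map_nil] at h
  unfold stepBP at h
  rw [h]

-- A's Jan-1 weekday equals B's w0 expression
set_option maxRecDepth 4096 in
lemma weekDay_jan1 (year : Int) :
    weekDay 1 1 year []
      = PySem.Int.mod (29 + (PySem.Int.mod year 100 - 1)
            + PySem.Int.floordiv (PySem.Int.mod year 100 - 1) 4
            + PySem.Int.floordiv (PySem.Int.floordiv (year - (PySem.Int.mod year 100 - 1)) 100) 4
            - 2 * PySem.Int.floordiv (year - (PySem.Int.mod year 100 - 1)) 100) 7 := by
  simp only [weekDay, List.length_nil, lt_irrefl]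
  norm_num

set_option maxRecDepth 8192 in
lemma pairsA_eq_pairsB (f0 leap : Int) (h0 : 0 ≤ f0) (h7 : f0 < 7)
    (hl : leap = 0 ∨ leap = 1) : pairsA f0 leap = pairsB f0 leap := by
  rcases hl with hl | hl <;> subst hl <;> interval_cases f0 <;> decide

-- ===== VERDICT (by name: the statement is the Claim_ definition above) =====
set_option maxRecDepth 8192 in
theorem allSundays_spec : Claim_equal_allSundays := by
  intro year _
  unfold Spec_allSundays
  rw [allSundays_eq_pairsA, allSundays_alt_eq_pairsB, weekDay_jan1]
  congr 1
  apply pairsA_eq_pairsB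
  · exact PySem.Int.mod_nonneg _ (by norm_num)
  · exact PySem.Int.mod_lt _ (by norm_num)
  · unfold pvLeapA; split <;> simp
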